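-- pv_equiv track=rewrite | github.com/JoshuaDuq/eegfmri-pipeline | eeg_pipeline/utils/data/trial_table.py | normalize_trial_table_feature_selection
-- ===== SOURCE A (Python) =====
-- from typing import Any, Dict, Iterable, List, Optional, Tuple
--
-- def normalize_trial_table_feature_selection(feature_files: Optional[List[str]]) -> List[str]:
--     """Normalize feature selection list for trial-table naming and lookup."""
--     if not feature_files:
--         return []
--     normalized = {
--         str(item).strip()
--         for item in feature_files
--         if str(item).strip() and str(item).strip().lower() != "all"
--     }
--     return sorted(normalized)
-- ===== SOURCE B (Python) =====
-- def normalize_trial_table_feature_selection(feature_files):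
--     """Normalize feature selection list for trial-table naming and lookup."""
--     if not feature_files:
--         return []
--     result = []
--     for item in feature_files:
--         s = str(item).strip()
--         if not s or s.lower() == "all":
--             continue
--         i = 0
--         while i < len(result) and result[i] < s:
--             i += 1
--         if i == len(result) or result[i] != s:
--             result.insert(i, s)
--     return result
-- ===== Notes on version B (the rewrite author's own statement) =====
-- stated objective: alternative
-- what changed: Replaces the set-comprehension-then-sort pipeline with a single on-line pass that keeps the result sorted and duplicate-free throughout, inserting each normalized string at its sorted position (skipping it when already present); no set and no sort call remain.
import Mathlib
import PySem

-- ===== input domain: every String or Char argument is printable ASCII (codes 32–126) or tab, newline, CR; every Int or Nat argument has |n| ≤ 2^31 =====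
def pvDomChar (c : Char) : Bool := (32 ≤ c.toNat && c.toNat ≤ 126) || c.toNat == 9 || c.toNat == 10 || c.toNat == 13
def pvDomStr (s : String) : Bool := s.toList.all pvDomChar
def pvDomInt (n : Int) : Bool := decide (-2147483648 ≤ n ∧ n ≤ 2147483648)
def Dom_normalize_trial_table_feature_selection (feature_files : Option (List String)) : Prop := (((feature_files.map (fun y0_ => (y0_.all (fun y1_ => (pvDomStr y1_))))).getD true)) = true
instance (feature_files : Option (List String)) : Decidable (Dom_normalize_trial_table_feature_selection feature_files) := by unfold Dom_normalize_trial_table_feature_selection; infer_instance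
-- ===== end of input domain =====

-- B replaces A's set-comprehension-then-sort by a single on-line pass maintaining a sorted
-- duplicate-free accumulator (sorted-position insertion); objective: alternative, same result.

-- ===== PORT A =====
-- keep-condition of A's set comprehension (str(item) on a str is the identity)
def pvKeepA (item : String) : Bool :=
  decide (PySem.Str.strip item ≠ "") && decide (PySem.Str.lower (PySem.Str.strip item) ≠ "all")

def normalize_trial_table_feature_selection (feature_files : Option (List String)) : List String :=
  match feature_files with
  | none => []
  | some xs =>
    if xs = [] then []   -- 'if not feature_files: return []'
    else
      let normalized : PySem.Set String :=
        PySem.Set.ofList ((xs.filter pvKeepA).map (fun item => PySem.Str.strip item))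
      PySem.List.sorted normalized (fun x => x) false

-- ===== PORT B =====
-- Source B's while loop 'scan past result[i] < s, then insert unless equal', as structural recursion
def pvSortedInsert (s : String) : List String → List String
  | [] => [s]
  | x :: t => if x < s then x :: pvSortedInsert s t
              else if x = s then x :: t
              else s :: x :: t

-- one loop-body step of Source B's for-loop
def pvStep (result : List String) (item : String) : List String :=
  let s := PySem.Str.strip item
  if s = "" || PySem.Str.lower s = "all" then result   -- 'continue'
  else pvSortedInsert s result

def normalize_trial_table_feature_selection_alt (feature_files : Option (List String)) : List String :=
  match feature_files with
  | none => []
  | some xs =>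
    if xs = [] then []
    else xs.foldl pvStep []

-- ===== PRECONDITION & SPEC =====
def Spec_normalize_trial_table_feature_selection (feature_files : Option (List String)) (out : List String) : Prop := out = normalize_trial_table_feature_selection_alt feature_files
instance (feature_files : Option (List String)) (out : List String) : Decidable (Spec_normalize_trial_table_feature_selection feature_files out) := by unfold Spec_normalize_trial_table_feature_selection; infer_instance

-- ===== CLAIM (what is proved, stated in full; the proofs are below) =====
def Claim_equal_normalize_trial_table_feature_selection : Prop := ∀ (feature_files : Option (List String)), Dom_normalize_trial_table_feature_selection feature_files → Spec_normalize_trial_table_feature_selection feature_files (normalize_trial_table_feature_selection feature_files)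

-- ===== LEMMAS AND PROOFS =====

theorem mem_pvSortedInsert (s x : String) (l : List String) :
    x ∈ pvSortedInsert s l ↔ x = s ∨ x ∈ l := by
  induction l with
  | nil => simp [pvSortedInsert]
  | cons a t ih =>
    simp only [pvSortedInsert]
    split_ifs with h1 h2
    · simp only [List.mem_cons, ih]; tauto
    · subst h2; simp only [List.mem_cons]; tauto
    · simp only [List.mem_cons]

theorem pairwise_pvSortedInsert (s : String) (l : List String)
    (h : l.Pairwise (· < ·)) : (pvSortedInsert s l).Pairwise (· < ·) := by
  induction l with
  | nil => simp [pvSortedInsert]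
  | cons a t ih =>
    rcases List.pairwise_cons.mp h with ⟨ha, ht⟩
    simp only [pvSortedInsert]
    split_ifs with h1 h2
    · refine List.pairwise_cons.mpr ⟨?_, ih ht⟩
      intro y hy
      rcases (mem_pvSortedInsert s y t).mp hy with rfl | hy
      · exact h1
      · exact ha y hy
    · exact h
    · refine List.pairwise_cons.mpr ⟨?_, h⟩
      intro y hy
      have hsa : s < a := lt_of_le_of_ne (le_of_not_gt h1) (Ne.symm h2)
      rcases List.mem_cons.mp hy with rfl | hy
      · exact hsa
      · exact lt_trans hsa (ha y hy)

-- invariant of B's fold: accumulator stays strictly sorted, members = kept strips so far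
theorem pvFold_invariant (xs : List String) : ∀ (acc : List String),
    acc.Pairwise (· < ·) →
    (xs.foldl pvStep acc).Pairwise (· < ·) ∧
    (∀ x, x ∈ xs.foldl pvStep acc ↔
      x ∈ acc ∨ x ∈ (xs.filter pvKeepA).map (fun item => PySem.Str.strip item)) := by
  induction xs with
  | nil => intro acc h; exact ⟨h, fun x => by simp⟩
  | cons a t ih =>
    intro acc h
    simp only [List.foldl_cons]
    by_cases hk : PySem.Str.strip a = "" ∨ PySem.Str.lower (PySem.Str.strip a) = "all"
    · have hstep : pvStep acc a = acc := by
        unfold pvStep; rcases hk with hk | hk <;> simp [hk]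
      have hfa : pvKeepA a = false := by
        unfold pvKeepA; rcases hk with hk | hk <;> simp [hk]
      rw [hstep]
      obtain ⟨hp, hm⟩ := ih acc h
      refine ⟨hp, fun x => ?_⟩
      rw [hm x, List.filter_cons, hfa]
      simp
    · rw [not_or] at hk
      have hstep : pvStep acc a = pvSortedInsert (PySem.Str.strip a) acc := by
        have hcond : (decide (PySem.Str.strip a = "") || decide (PySem.Str.lower (PySem.Str.strip a) = "all")) = false := by
          simp only [Bool.or_eq_false_iff, decide_eq_false_iff_not]
          exact ⟨hk.1, hk.2⟩
        simp only [pvStep, hcond, Bool.false_eq_true, if_false]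
      have hfa : pvKeepA a = true := by unfold pvKeepA; simp [hk.1, hk.2]
      rw [hstep]
      obtain ⟨hp, hm⟩ := ih (pvSortedInsert (PySem.Str.strip a) acc) (pairwise_pvSortedInsert _ _ h)
      refine ⟨hp, fun x => ?_⟩
      have hf : (a :: t).filter pvKeepA = a :: t.filter pvKeepA := by
        simp [hfa]
      rw [hm x, mem_pvSortedInsert, hf]
      simp only [List.map_cons, List.mem_cons]
      rw [or_assoc]
      exact or_left_comm

-- ===== VERDICT (by name: the statement is the Claim_ definition above) =====
theorem normalize_trial_table_feature_selection_spec : Claim_equal_normalize_trial_table_feature_selection := by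
  intro ff _
  unfold Spec_normalize_trial_table_feature_selection
  match ff with
  | none => rfl
  | some xs =>
    simp only [normalize_trial_table_feature_selection, normalize_trial_table_feature_selection_alt]
    by_cases h : xs = []
    · simp [h]
    · simp only [h, if_false]
      have inv := pvFold_invariant xs [] (by simp)
      apply PySem.List.sorted_eq_of_perm_of_pairwise_lt
      · apply (List.perm_ext_iff_of_nodup (inv.1.imp ne_of_lt) (PySem.Set.nodup_ofList _)).mpr
        intro x
        rw [inv.2 x]
        simp [PySem.Set.mem_ofList]
      · simpa using inv.1
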